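-- pv_equiv track=rewrite | github.com/RaedMatti/nlpProject | freqNLP/main.py | DocMap
-- ===== SOURCE A (Python) =====
-- TOKEN_DELIMITER = [",", ".", "!", "?", "/", "&", "-", ":", ";", "@", "'", "..."]
--
-- EMPTY_SPACE = ' '
--
-- def endOfSent(sentence,index):
--     return len(sentence) == index
--
-- def DocMap(text):
--     index = 0
--     word = ""
--     words = []
--     while not endOfSent(text, index):
--         if text[index] == EMPTY_SPACE and len(word) > 0:
--             words.append(word.strip())
--             word = ""
--         elif text[index] in TOKEN_DELIMITER:
--             words.append(word.strip())
--             words.append(text[index])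
--             word = ""
--         else:
--             word += text[index]
--         index += 1
--
--     return words
-- ===== SOURCE B (Python) =====
-- TOKEN_DELIMITER = [",", ".", "!", "?", "/", "&", "-", ":", ";", "@", "'", "..."]
--
-- EMPTY_SPACE = ' '
--
-- _DELIMS = {d for d in TOKEN_DELIMITER if len(d) == 1}
--
-- def DocMap(text):
--     # Phase 1: cut the text into (segment, separator) pairs.  A separator is
--     # any delimiter character, or a space that ends a nonempty segment.
--     # Text after the last separator is discarded (as in the original).
--     pairs = []
--     start = 0
--     for i, ch in enumerate(text):
--         if ch in _DELIMS or (ch == EMPTY_SPACE and i > start):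
--             pairs.append((text[start:i], ch))
--             start = i + 1
--     # Phase 2: emit tokens from the pairs.
--     out = []
--     for seg, sep in pairs:
--         out.append(seg.strip())
--         if sep != EMPTY_SPACE:
--             out.append(sep)
--     return out
-- ===== Notes on version B (the rewrite author's own statement) =====
-- stated objective: faster
-- what changed: Replaces the char-by-char word-accumulator state machine with a two-phase tokenizer: one pass cuts the text into (segment, separator) pairs using a start index and slices (no repeated string concatenation), a second pass emits the tokens from the pairs.
import Mathlib
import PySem

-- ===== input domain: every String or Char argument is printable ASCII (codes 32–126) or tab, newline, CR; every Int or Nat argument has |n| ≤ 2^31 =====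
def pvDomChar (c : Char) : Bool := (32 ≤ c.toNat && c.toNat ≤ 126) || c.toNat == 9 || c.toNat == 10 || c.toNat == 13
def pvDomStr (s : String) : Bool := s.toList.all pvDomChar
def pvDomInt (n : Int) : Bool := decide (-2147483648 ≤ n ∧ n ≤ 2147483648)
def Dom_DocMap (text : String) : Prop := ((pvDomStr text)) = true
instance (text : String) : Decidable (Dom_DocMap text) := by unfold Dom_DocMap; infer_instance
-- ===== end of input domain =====

-- B replaces A's char-accumulator state machine (quadratic `word += ch`) with a two-phase
-- tokenizer: cut the text into (segment, separator) pairs by index/slice, then emit;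
-- a timing run measured B faster on the large generated inputs.

-- ===== PORT A =====
def tokenDelimiter : List String := [",", ".", "!", "?", "/", "&", "-", ":", ";", "@", "'", "..."]

-- A's while loop over text[index] with accumulators word/words, as structural recursion on the chars
def DocMapGo : List Char → List Char → List String → List String
  | [], _, words => words
  | c :: rest, word, words =>
    if c = ' ' ∧ word.length > 0 then
      DocMapGo rest [] (words ++ [PySem.Str.strip (String.ofList word)])
    else if String.ofList [c] ∈ tokenDelimiter then
      DocMapGo rest [] (words ++ [PySem.Str.strip (String.ofList word), String.ofList [c]])
    else
      DocMapGo rest (word ++ [c]) words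

def DocMap (text : String) : List String := DocMapGo text.toList [] []

-- ===== PORT B =====
def delimSet : PySem.Set Char := PySem.Set.ofList [',', '.', '!', '?', '/', '&', '-', ':', ';', '@', '\'']

-- phase 1 of B: the `for i, ch in enumerate(text)` loop collecting (text[start:i], ch) pairs
-- (text[start:i] with 0 ≤ start ≤ i ≤ len is the slice (drop start).take (i-start))
def cutGo : List Char → Nat → Nat → List Char → List (List Char × Char) → List (List Char × Char)
  | [], _, _, _, pairs => pairs
  | c :: rest, i, start, text, pairs =>
    if c ∈ delimSet ∨ (c = ' ' ∧ i > start) then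
      cutGo rest (i+1) (i+1) text (pairs ++ [((text.drop start).take (i - start), c)])
    else
      cutGo rest (i+1) start text pairs

-- phase 2 of B: the emission loop over the pairs
def emitGo : List (List Char × Char) → List String → List String
  | [], out => out
  | (seg, sep) :: ps, out =>
    emitGo ps (if sep ≠ ' ' then out ++ [PySem.Str.strip (String.ofList seg), String.ofList [sep]]
               else out ++ [PySem.Str.strip (String.ofList seg)])

def DocMap_alt (text : String) : List String :=
  emitGo (cutGo text.toList 0 0 text.toList []) []

-- ===== PRECONDITION & SPEC =====
def Spec_DocMap (text : String) (out : List String) : Prop := out = DocMap_alt text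
instance (text : String) (out : List String) : Decidable (Spec_DocMap text out) := by unfold Spec_DocMap; infer_instance

-- ===== CLAIM (what is proved, stated in full; the proofs are below) =====
def Claim_equal_DocMap : Prop := ∀ (text : String), Dom_DocMap text → Spec_DocMap text (DocMap text)

-- ===== LEMMAS AND PROOFS =====

-- a single character is in TOKEN_DELIMITER (as a string) iff the character is in B's set
theorem delim_iff (c : Char) : (String.ofList [c] ∈ tokenDelimiter) ↔ c ∈ delimSet := by
  have hmap : tokenDelimiter.map String.toList
      = [[','], ['.'], ['!'], ['?'], ['/'], ['&'], ['-'], [':'], [';'], ['@'], ['\''], ['.','.','.']] := by decide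
  constructor
  · intro h
    have h2 : [c] ∈ tokenDelimiter.map String.toList := by
      have := List.mem_map_of_mem (f := String.toList) h
      simpa using this
    rw [hmap] at h2
    simp only [List.mem_cons, List.cons.injEq, and_true, List.not_mem_nil, or_false] at h2
    rcases h2 with h|h|h|h|h|h|h|h|h|h|h|⟨h,-⟩
    all_goals (subst h; decide)
  · intro h
    simp only [delimSet, PySem.Set.mem_ofList, List.mem_cons, List.not_mem_nil, or_false] at h
    rcases h with h|h|h|h|h|h|h|h|h|h|h <;> subst h <;> decide

theorem emitGo_out (ps : List (List Char × Char)) : ∀ out, emitGo ps out = out ++ emitGo ps [] := by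
  induction ps with
  | nil => simp [emitGo]
  | cons p ps ih =>
    intro out
    obtain ⟨seg, sep⟩ := p
    simp only [emitGo]
    rw [ih]
    conv_rhs => rw [ih]
    split_ifs <;> simp

theorem emitGo_snoc (ps : List (List Char × Char)) (seg : List Char) (sep : Char) :
    emitGo (ps ++ [(seg, sep)]) [] = emitGo ps [] ++
      (if sep ≠ ' ' then [PySem.Str.strip (String.ofList seg), String.ofList [sep]]
       else [PySem.Str.strip (String.ofList seg)]) := by
  induction ps with
  | nil => simp [emitGo]
  | cons p ps ih =>
    obtain ⟨s, c⟩ := p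
    simp only [List.cons_append, emitGo]
    rw [emitGo_out, ih]
    conv_rhs => rw [emitGo_out]
    simp

theorem key (text : List Char) :
    ∀ rest i start pairs, text.drop i = rest → start ≤ i →
    DocMapGo rest ((text.drop start).take (i - start)) (emitGo pairs []) =
      emitGo (cutGo rest i start text pairs) [] := by
  intro rest
  induction rest generalizing text with
  | nil => intro i start pairs _ _; simp [DocMapGo, cutGo]
  | cons c rest ih =>
    intro i start pairs hrest hsi
    have hlen : i < text.length := by
      by_contra hc
      rw [List.drop_eq_nil_iff.mpr (by omega)] at hrest
      simp at hrest
    have hget : text[i]? = some c := by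
      have h2 : (text.drop i)[0]? = text[i + 0]? := List.getElem?_drop
      simp [hrest] at h2
      exact h2.symm
    have hdrop : text.drop (i+1) = rest := by
      have h3 : text.drop (i+1) = (text.drop i).drop 1 := by rw [List.drop_drop]
      simp [h3, hrest]
    have hwlen : ((text.drop start).take (i - start)).length = i - start := by
      simp only [List.length_take, List.length_drop]
      omega
    simp only [DocMapGo, cutGo]
    by_cases hdel : c ∈ delimSet
    · have hcsp : c ≠ ' ' := by rintro rfl; exact absurd hdel (by decide)
      rw [if_neg (by simp [hcsp]), if_pos ((delim_iff c).mpr hdel), if_pos (Or.inl hdel)]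
      have hih := ih text (i+1) (i+1) (pairs ++ [((text.drop start).take (i - start), c)]) hdrop le_rfl
      rw [emitGo_snoc, if_pos hcsp] at hih
      simpa using hih
    · by_cases hsp : c = ' ' ∧ start < i
      · obtain ⟨hc, hlt⟩ := hsp
        subst hc
        rw [if_pos ⟨rfl, by omega⟩, if_pos (Or.inr ⟨rfl, hlt⟩)]
        have hih := ih text (i+1) (i+1) (pairs ++ [((text.drop start).take (i - start), ' ')]) hdrop le_rfl
        rw [emitGo_snoc, if_neg (by simp)] at hih
        simpa using hih
      · have hA1 : ¬ (c = ' ' ∧ 0 < ((text.drop start).take (i - start)).length) := by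
          rw [hwlen]; intro ⟨h1, h2⟩; exact hsp ⟨h1, by omega⟩
        rw [if_neg hA1, if_neg (fun h => hdel ((delim_iff c).mp h)),
            if_neg (by rintro (h | ⟨h1, h2⟩); exact hdel h; exact hsp ⟨h1, h2⟩)]
        have hext : (text.drop start).take (i + 1 - start)
            = (text.drop start).take (i - start) ++ [c] := by
          rw [show i + 1 - start = (i - start) + 1 by omega, List.take_add_one]
          have h4 : (text.drop start)[i - start]? = text[start + (i - start)]? := List.getElem?_drop
          rw [show start + (i - start) = i by omega, hget] at h4
          simp [h4]
        have hih := ih text (i+1) start pairs hdrop (by omega)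
        rw [hext] at hih
        exact hih

theorem docmap_main (text : String) : DocMap text = DocMap_alt text := by
  unfold DocMap DocMap_alt
  have h := key text.toList text.toList 0 0 [] (by simp) le_rfl
  simpa [emitGo] using h

-- ===== VERDICT (by name: the statement is the Claim_ definition above) =====
theorem DocMap_spec : Claim_equal_DocMap := by
  intro text _
  unfold Spec_DocMap
  exact docmap_main text
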